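-- pv_equiv track=rewrite | github.com/Vtestcode/multi-agent-trading-platform | agents/execution_agent.py | _pick_tool_name
-- ===== SOURCE A (Python) =====
-- from typing import Any, Dict, Iterable, Optional
--
-- class ExecutionError(RuntimeError):
--     """Raised when MCP order placement fails."""
--
-- def _pick_tool_name(available_tools: Iterable[str]) -> str:
--     preferred = [
--         "place_stock_order",
--         "create_order",
--         "submit_order",
--         "place_order",
--     ]
--     available_tools = set(available_tools)
--     for name in preferred:
--         if name in available_tools:
--             return name
--     raise ExecutionError(
--         f"Could not find a supported stock order tool. Available tools: {sorted(available_tools)}"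
--     )
-- ===== SOURCE B (Python) =====
-- class ExecutionError(RuntimeError):
--     """Raised when MCP order placement fails."""
--
-- def _pick_tool_name(available_tools):
--     preferred = [
--         "place_stock_order",
--         "create_order",
--         "submit_order",
--         "place_order",
--     ]
--     rank = {name: i for i, name in enumerate(preferred)}
--     seen = set()
--     best = None
--     for name in available_tools:
--         seen.add(name)
--         r = rank.get(name)
--         if r is not None and (best is None or r < best):
--             best = r
--     if best is not None:
--         return preferred[best]
--     raise ExecutionError(
--         f"Could not find a supported stock order tool. Available tools: {sorted(seen)}"
--     )
-- ===== Notes on version B (the rewrite author's own statement) =====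
-- stated objective: alternative
-- what changed: Instead of scanning the fixed preference list and testing membership in a set of available tools, B makes one pass over the available tools maintaining the minimum preference rank seen (via a name-to-rank dictionary) and returns the preferred name of that rank.
import Mathlib
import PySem

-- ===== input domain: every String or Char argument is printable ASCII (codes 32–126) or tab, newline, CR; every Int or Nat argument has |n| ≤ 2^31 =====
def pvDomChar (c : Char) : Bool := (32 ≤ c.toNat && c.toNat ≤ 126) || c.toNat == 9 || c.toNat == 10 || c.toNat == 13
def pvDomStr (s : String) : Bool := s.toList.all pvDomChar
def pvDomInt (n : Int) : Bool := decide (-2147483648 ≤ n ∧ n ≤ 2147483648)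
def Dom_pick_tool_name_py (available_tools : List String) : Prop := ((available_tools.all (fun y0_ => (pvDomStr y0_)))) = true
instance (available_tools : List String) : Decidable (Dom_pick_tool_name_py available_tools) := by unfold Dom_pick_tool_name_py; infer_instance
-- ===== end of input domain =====

-- B replaces A's scan of the preference list (first membership hit in a set) by a single pass
-- over the available tools keeping the minimum preference rank via a rank dictionary (objective: alternative).


-- ===== PORT A =====
def pvPreferred : List String :=
  ["place_stock_order", "create_order", "submit_order", "place_order"]

-- 'for name in preferred: if name in available_tools: return name'; the raise becomes none → getD ""
def pvPickLoop (s : PySem.Set String) : List String → Option String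
  | [] => none
  | n :: rest => if PySem.Set.contains s n then some n else pvPickLoop s rest

def pick_tool_name_py (available_tools : List String) : String :=
  let s := PySem.Set.ofList available_tools
  (pvPickLoop s pvPreferred).getD ""

-- ===== PORT B =====
def pvPreferredB : List String :=
  ["place_stock_order", "create_order", "submit_order", "place_order"]

-- rank = {name: i for i, name in enumerate(preferred)}
def pvRank : PySem.Dict String Int :=
  (PySem.List.enumerate pvPreferredB 0).foldl (fun d p => PySem.Dict.insert d p.2 p.1) PySem.Dict.empty

def pick_tool_name_py_alt (available_tools : List String) : String :=
  let best := available_tools.foldl (fun best name =>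
      match PySem.Dict.get? pvRank name with
      | some r => match best with
                  | none => some r
                  | some b => if r < b then some r else some b
      | none => best) none
  match best with
  | some b => (PySem.List.pyGet? pvPreferredB b).getD ""   -- preferred[best]; raise branch becomes ""
  | none => ""

-- ===== PRECONDITION & SPEC =====
-- Pre_ excludes exactly the inputs containing none of the four preferred names, on which A raises ExecutionError.
def Pre_pick_tool_name_py (available_tools : List String) : Prop :=
  "place_stock_order" ∈ available_tools ∨ "create_order" ∈ available_tools ∨
  "submit_order" ∈ available_tools ∨ "place_order" ∈ available_tools
instance (available_tools : List String) : Decidable (Pre_pick_tool_name_py available_tools) := by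
  unfold Pre_pick_tool_name_py; infer_instance

def pvWitness_pick_tool_name_py : List String := ["foo", "submit_order", "place_order"]

def Spec_pick_tool_name_py (available_tools : List String) (out : String) : Prop := out = pick_tool_name_py_alt available_tools
instance (available_tools : List String) (out : String) : Decidable (Spec_pick_tool_name_py available_tools out) := by unfold Spec_pick_tool_name_py; infer_instance

-- ===== CLAIM (what is proved, stated in full; the proofs are below) =====
def Claim_equal_pick_tool_name_py : Prop := ∀ (available_tools : List String), Dom_pick_tool_name_py available_tools → Pre_pick_tool_name_py available_tools → Spec_pick_tool_name_py available_tools (pick_tool_name_py available_tools)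

-- ===== LEMMAS AND PROOFS =====

-- closed form of the rank lookup
def pvRk (n : String) : Option Int :=
  if n = "place_stock_order" then some 0
  else if n = "create_order" then some 1
  else if n = "submit_order" then some 2
  else if n = "place_order" then some 3
  else none

lemma pvRank_get (n : String) : PySem.Dict.get? pvRank n = pvRk n := by
  show PySem.Dict.get? (PySem.Dict.mk [("place_stock_order", 0), ("create_order", 1),
      ("submit_order", 2), ("place_order", 3)]) n = pvRk n
  by_cases h0 : n = "place_stock_order"
  · subst h0; rfl
  by_cases h1 : n = "create_order"
  · subst h1; rfl
  by_cases h2 : n = "submit_order"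
  · subst h2; rfl
  by_cases h3 : n = "place_order"
  · subst h3; rfl
  simp [PySem.Dict.get?_mk_cons, PySem.Dict.get?, pvRk, beq_iff_eq, h0, h1, h2, h3,
    Ne.symm h0, Ne.symm h1, Ne.symm h2, Ne.symm h3]

-- option-min combining: the fold's accumulator update
def pvOmin : Option Int → Option Int → Option Int
  | none, y => y
  | some b, none => some b
  | some b, some r => some (min b r)

def pvBody (best : Option Int) (name : String) : Option Int :=
  match PySem.Dict.get? pvRank name with
  | some r => match best with
              | none => some r
              | some b => if r < b then some r else some b
  | none => best

lemma pvBody_eq (best : Option Int) (name : String) :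
    pvBody best name = pvOmin best (pvRk name) := by
  simp only [pvBody, pvRank_get]
  cases h : pvRk name with
  | none => cases best <;> simp [pvOmin]
  | some r =>
    cases best with
    | none => simp [pvOmin]
    | some b =>
      simp only [pvOmin]
      split_ifs with hr <;> simp [min_def] <;> omega

lemma pvOmin_assoc (x y z : Option Int) :
    pvOmin (pvOmin x y) z = pvOmin x (pvOmin y z) := by
  cases x <;> cases y <;> cases z <;> simp [pvOmin, min_assoc]

-- minimum rank present in the list, folded from the right
def pvMm (ats : List String) : Option Int := ats.foldr (fun a acc => pvOmin (pvRk a) acc) none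

lemma pvFold_eq (ats : List String) (best : Option Int) :
    ats.foldl pvBody best = pvOmin best (pvMm ats) := by
  induction ats generalizing best with
  | nil => cases best <;> simp [pvMm, pvOmin]
  | cons a ats ih =>
    simp only [List.foldl_cons, ih, pvBody_eq, pvMm, List.foldr_cons, ← pvOmin_assoc]

-- pvMm as the four-way membership chain
lemma pvMm_chain (ats : List String) :
    pvMm ats =
      if "place_stock_order" ∈ ats then some 0
      else if "create_order" ∈ ats then some 1
      else if "submit_order" ∈ ats then some 2
      else if "place_order" ∈ ats then some 3
      else none := by
  induction ats with
  | nil => simp [pvMm]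
  | cons a ats ih =>
    simp only [pvMm, List.foldr_cons] at *
    rw [ih]
    by_cases h0 : a = "place_stock_order" <;> by_cases h1 : a = "create_order" <;>
      by_cases h2 : a = "submit_order" <;> by_cases h3 : a = "place_order" <;>
      simp_all [pvRk, List.mem_cons] <;>
      split_ifs <;> simp_all [pvOmin] <;> omega

-- ===== VERDICT (by name: the statement is the Claim_ definition above) =====
theorem pick_tool_name_py_spec : Claim_equal_pick_tool_name_py := by
  intro ats _ hpre
  unfold Spec_pick_tool_name_py pick_tool_name_py pick_tool_name_py_alt
  have hfold : ats.foldl (fun best name =>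
      match PySem.Dict.get? pvRank name with
      | some r => match best with
                  | none => some r
                  | some b => if r < b then some r else some b
      | none => best) none = pvMm ats := by
    have := pvFold_eq ats none
    simpa [pvOmin, pvBody] using this
  rw [hfold, pvMm_chain]
  simp only [pvPickLoop, pvPreferred, PySem.Set.contains_eq_listContains]
  by_cases h0 : "place_stock_order" ∈ ats <;> by_cases h1 : "create_order" ∈ ats <;>
    by_cases h2 : "submit_order" ∈ ats <;> by_cases h3 : "place_order" ∈ ats <;>
    simp_all [Pre_pick_tool_name_py, PySem.Set.mem_ofList, PySem.List.pyGet?,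
      PySem.List.pyIdx?, List.contains_eq_mem, pvPreferredB]
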